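-- pv_equiv track=rewrite | github.com/yanny526/SkyHustle | modules/building_manager.py | get_production_rates
-- ===== SOURCE A (Python) =====
-- PRODUCTION_PER_LEVEL = {
--     "Bank":       ("credits", 10),
--     "Mine":       ("minerals", 5),
--     "PowerPlant": ("energy", 3),
--     # extend as needed...
-- }
--
-- def get_production_rates(build_info: dict) -> dict:
--     rates = {"credits": 0, "minerals": 0, "energy": 0}
--     for bld, lvl in build_info.items():
--         prod = PRODUCTION_PER_LEVEL.get(bld)
--         if prod:
--             resource, per = prod
--             rates[resource] += per * lvl
--     return rates
-- ===== SOURCE B (Python) =====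
-- PRODUCTION_PER_LEVEL = {
--     "Bank":       ("credits", 10),
--     "Mine":       ("minerals", 5),
--     "PowerPlant": ("energy", 3),
--     # extend as needed...
-- }
--
-- def get_production_rates(build_info: dict) -> dict:
--     # Drive the loop by the fixed production table instead of the input:
--     # for each known producing building, look its level up in build_info.
--     return {resource: per * build_info.get(bld, 0)
--             for bld, (resource, per) in PRODUCTION_PER_LEVEL.items()}
-- ===== Notes on version B (the rewrite author's own statement) =====
-- stated objective: alternative
-- what changed: B iterates the fixed PRODUCTION_PER_LEVEL table and looks each building's level up in build_info with .get (building the result as a comprehension), instead of A's loop over build_info accumulating into a pre-zeroed rates dict.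
import Mathlib
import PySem

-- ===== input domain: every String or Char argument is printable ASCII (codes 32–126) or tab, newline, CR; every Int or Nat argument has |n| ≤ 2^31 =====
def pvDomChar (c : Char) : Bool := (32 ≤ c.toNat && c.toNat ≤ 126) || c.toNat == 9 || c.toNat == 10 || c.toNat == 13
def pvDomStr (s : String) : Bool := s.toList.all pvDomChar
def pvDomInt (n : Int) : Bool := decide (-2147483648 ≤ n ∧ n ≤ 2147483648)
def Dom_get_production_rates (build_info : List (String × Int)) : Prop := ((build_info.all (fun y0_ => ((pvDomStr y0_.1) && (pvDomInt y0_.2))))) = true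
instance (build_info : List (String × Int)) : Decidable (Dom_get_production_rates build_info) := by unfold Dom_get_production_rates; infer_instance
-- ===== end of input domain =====

-- B drives the loop by the fixed production table (a comprehension with per-building .get
-- lookups) instead of A's accumulation loop over build_info; alternative decomposition, not faster.

-- ===== PORT A =====

-- PRODUCTION_PER_LEVEL, the module-level table
def pvTable : PySem.Dict String (String × Int) :=
  PySem.Dict.mk [("Bank", ("credits", 10)), ("Mine", ("minerals", 5)), ("PowerPlant", ("energy", 3))]

-- the loop body of A (one build_info item applied to the rates dict)
def pvStepA (rates : PySem.Dict String Int) (p : String × Int) : PySem.Dict String Int :=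
  match pvTable.get? p.1 with
  | some rp => rates.modify rp.1 0 (· + rp.2 * p.2)   -- rates[resource] += per * lvl (key always present)
  | none => rates

def get_production_rates (build_info : List (String × Int)) : List (String × Int) :=
  (build_info.foldl pvStepA
    (PySem.Dict.mk [("credits", 0), ("minerals", 0), ("energy", 0)])).items

-- ===== PORT B =====
def get_production_rates_alt (build_info : List (String × Int)) : List (String × Int) :=
  pvTable.items.map (fun p => (p.2.1, p.2.2 * PySem.Dict.getD (PySem.Dict.mk build_info) p.1 0))

-- ===== PRECONDITION & SPEC =====
-- Pre_ requires distinct keys: a Python dict argument can never carry a duplicate key, so no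
-- actual Python input is excluded; assoc lists with duplicates correspond to no dict.
def Pre_get_production_rates (build_info : List (String × Int)) : Prop :=
  (build_info.map Prod.fst).Nodup
instance (build_info : List (String × Int)) : Decidable (Pre_get_production_rates build_info) := by
  unfold Pre_get_production_rates; infer_instance

def pvWitness_get_production_rates : (List (String × Int)) := [("Bank", 2), ("Mine", 3), ("Tower", 1)]

def Spec_get_production_rates (build_info : List (String × Int)) (out : List (String × Int)) : Prop := out = get_production_rates_alt build_info
instance (build_info : List (String × Int)) (out : List (String × Int)) : Decidable (Spec_get_production_rates build_info out) := by unfold Spec_get_production_rates; infer_instance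

-- ===== CLAIM (what is proved, stated in full; the proofs are below) =====
def Claim_equal_get_production_rates : Prop := ∀ (build_info : List (String × Int)), Dom_get_production_rates build_info → Pre_get_production_rates build_info → Spec_get_production_rates build_info (get_production_rates build_info)

-- ===== LEMMAS AND PROOFS =====

-- sum of the levels recorded for building k
def pvLvlSum (k : String) (l : List (String × Int)) : Int :=
  ((l.filter (fun p => p.1 = k)).map Prod.snd).sum

theorem pvLvlSum_cons (k : String) (p : String × Int) (l : List (String × Int)) :
    pvLvlSum k (p :: l) = (if p.1 = k then p.2 else 0) + pvLvlSum k l := by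
  by_cases h : p.1 = k <;> simp [pvLvlSum, h]

theorem pvStepA_bank (c m e lvl : Int) :
    pvStepA (PySem.Dict.mk [("credits", c), ("minerals", m), ("energy", e)]) ("Bank", lvl) =
    PySem.Dict.mk [("credits", c + 10 * lvl), ("minerals", m), ("energy", e)] := rfl

theorem pvStepA_mine (c m e lvl : Int) :
    pvStepA (PySem.Dict.mk [("credits", c), ("minerals", m), ("energy", e)]) ("Mine", lvl) =
    PySem.Dict.mk [("credits", c), ("minerals", m + 5 * lvl), ("energy", e)] := rfl

theorem pvStepA_power (c m e lvl : Int) :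
    pvStepA (PySem.Dict.mk [("credits", c), ("minerals", m), ("energy", e)]) ("PowerPlant", lvl) =
    PySem.Dict.mk [("credits", c), ("minerals", m), ("energy", e + 3 * lvl)] := rfl

theorem pvStepA_other (d : PySem.Dict String Int) (k : String) (lvl : Int)
    (h1 : k ≠ "Bank") (h2 : k ≠ "Mine") (h3 : k ≠ "PowerPlant") :
    pvStepA d (k, lvl) = d := by
  simp [pvStepA, pvTable, PySem.Dict.get?,
    Ne.symm h1, Ne.symm h2, Ne.symm h3]

-- A's fold, characterised on an arbitrary state of the fixed shape
theorem pvFoldA (l : List (String × Int)) (c m e : Int) :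
    l.foldl pvStepA (PySem.Dict.mk [("credits", c), ("minerals", m), ("energy", e)]) =
    PySem.Dict.mk [("credits", c + 10 * pvLvlSum "Bank" l),
                   ("minerals", m + 5 * pvLvlSum "Mine" l),
                   ("energy", e + 3 * pvLvlSum "PowerPlant" l)] := by
  induction l generalizing c m e with
  | nil => simp [pvLvlSum]
  | cons p l ih =>
    obtain ⟨k, lvl⟩ := p
    simp only [List.foldl_cons, pvLvlSum_cons]
    by_cases h1 : k = "Bank"
    · subst h1; rw [pvStepA_bank, ih]; norm_num; ring_nf; simp
    · by_cases h2 : k = "Mine"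
      · subst h2; rw [pvStepA_mine, ih]; norm_num; ring_nf; simp
      · by_cases h3 : k = "PowerPlant"
        · subst h3; rw [pvStepA_power, ih]; norm_num; ring_nf; simp
        · rw [pvStepA_other _ _ _ h1 h2 h3, ih]; simp [h1, h2, h3]

-- with distinct keys, the summed level IS the first-match lookup
theorem pvLvlSum_eq_getD (l : List (String × Int)) (k : String)
    (h : (l.map Prod.fst).Nodup) :
    pvLvlSum k l = PySem.Dict.getD (PySem.Dict.mk l) k 0 := by
  induction l with
  | nil => rfl
  | cons p l ih =>
    obtain ⟨k0, v⟩ := p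
    simp only [List.map_cons, List.nodup_cons] at h
    rw [pvLvlSum_cons]
    by_cases hk : k0 = k
    · subst hk
      have hnm : pvLvlSum k0 l = 0 := by
        have : l.filter (fun q => q.1 = k0) = [] := by
          rw [List.filter_eq_nil_iff]
          intro q hq hq1
          exact h.1 (of_decide_eq_true hq1 ▸ List.mem_map_of_mem (f := Prod.fst) hq)
        simp [pvLvlSum, this]
      simp [PySem.Dict.getD, PySem.Dict.get?_mk_cons, hnm]
    · rw [ih h.2]
      simp [PySem.Dict.getD, PySem.Dict.get?_mk_cons, hk]

-- ===== VERDICT (by name: the statement is the Claim_ definition above) =====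
theorem get_production_rates_spec : Claim_equal_get_production_rates := by
  intro build_info _ hpre
  unfold Spec_get_production_rates get_production_rates get_production_rates_alt
  rw [pvFoldA]
  simp [pvTable,
    pvLvlSum_eq_getD build_info "Bank" hpre,
    pvLvlSum_eq_getD build_info "Mine" hpre,
    pvLvlSum_eq_getD build_info "PowerPlant" hpre]
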